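-- pv_equiv track=rewrite | github.com/kkr010128/codebert | problem021/problem021_10.py | area_cal
-- ===== SOURCE A (Python) =====
-- def area_cal(input_fig):
--     stack = []
--     # area = [[面積計算が始まった位置, 面積],・・・]
--     area = []
--     total = 0
--     for i in range(len(input_fig)):
--         fig = input_fig[i]
--         if fig == "\\":
--             stack.append(i)
--         elif fig == "/" and stack:
--             j = stack.pop()
--             width = i - j
--             total += width
--             while area and area[-1][0] > j:
--                 width += area[-1][1]
--                 area.pop()
--             area.append([i,width])
--     return area, total
-- ===== SOURCE B (Python) =====
-- def area_cal(input_fig):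
--     # One stack of [position, pending-pools] entries; nested pool areas are
--     # folded into the enclosing entry eagerly, so no separate area list with
--     # a while-merge is needed.
--     stack = []
--     result = []
--     total = 0
--     for i, fig in enumerate(input_fig):
--         if fig == "\\":
--             stack.append([i, []])
--         elif fig == "/" and stack:
--             j, pools = stack.pop()
--             total += i - j
--             w = (i - j) + sum(a for _, a in pools)
--             if stack:
--                 stack[-1][1].append([i, w])
--             else:
--                 result.append([i, w])
--     for _, pools in stack:
--         result.extend(pools)
--     return result, total
-- ===== Notes on version B (the rewrite author's own statement) =====
-- stated objective: simpler
-- what changed: Replaces A's positions-stack plus separate area list with an inner while-merge by a single stack of (position, pending-pools) entries that folds each closed pool into its enclosing stack entry eagerly, flushing leftover pools at the end.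
import Mathlib
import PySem

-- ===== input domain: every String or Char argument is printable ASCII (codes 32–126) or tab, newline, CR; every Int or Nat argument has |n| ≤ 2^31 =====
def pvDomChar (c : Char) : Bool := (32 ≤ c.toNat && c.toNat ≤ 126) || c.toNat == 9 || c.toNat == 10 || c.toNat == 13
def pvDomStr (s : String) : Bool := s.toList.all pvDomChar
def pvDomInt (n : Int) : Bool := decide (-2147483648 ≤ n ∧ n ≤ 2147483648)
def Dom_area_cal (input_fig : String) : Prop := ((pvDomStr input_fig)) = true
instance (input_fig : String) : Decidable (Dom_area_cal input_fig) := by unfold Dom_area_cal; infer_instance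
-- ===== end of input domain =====

-- B replaces A's positions-stack + separate area list with a while-merge by a single
-- stack of (position, pending-pools) entries that folds nested pool areas in eagerly.


-- ===== PORT A =====
-- Python's `area` list is kept most-recent-first (append/pop act at the Python list's
-- end = head here) and reversed at return.  Entries are always the 2-lists [i, width]
-- the loop itself appends, so area[-1][0] / area[-1][1] are ported as headD 0 / getD 1 0
-- (exact on every reachable state).
-- `while area and area[-1][0] > j: width += area[-1][1]; area.pop()`
def areaCalMerge (j width : Int) (areaRev : List (List Int)) : Int × List (List Int) :=
  match areaRev with
  | [] => (width, [])
  | e :: rest =>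
    if j < e.headD 0 then areaCalMerge j (width + e.getD 1 0) rest
    else (width, e :: rest)

-- loop body: state = (stack, areaRev, total), one enumerated character (i, fig)
def areaCalStep : (List Int × List (List Int) × Int) → Int × Char → List Int × List (List Int) × Int
  | (stack, areaRev, total), (i, fig) =>
    if fig = '\\' then (i :: stack, areaRev, total)
    else if fig = '/' then
      match stack with
      | [] => (stack, areaRev, total)                  -- `and stack` fails: skip
      | j :: stack' =>
        let width := i - j
        let m := areaCalMerge j width areaRev
        (stack', [i, m.1] :: m.2, total + width)
    else (stack, areaRev, total)

def area_cal (input_fig : String) : List (List Int) × Int :=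
  let s := (PySem.List.enumerate input_fig.toList 0).foldl areaCalStep ([], [], 0)
  (s.2.1.reverse, s.2.2)

-- ===== PORT B =====
-- `sum(a for _, a in pools)`; pool entries are the 2-lists [i, w] B builds
def areaAltSum (pools : List (List Int)) : Int := (pools.map (fun e => e.getD 1 0)).sum

-- loop body: state = (stack of (pos, pending pools), result, total); stack top-first
def areaAltStep : (List (Int × List (List Int)) × List (List Int) × Int) → Int × Char →
    List (Int × List (List Int)) × List (List Int) × Int
  | (stack, result, total), (i, fig) =>
    if fig = '\\' then ((i, []) :: stack, result, total)
    else if fig = '/' then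
      match stack with
      | [] => (stack, result, total)
      | (j, pools) :: stack' =>
        let w := (i - j) + areaAltSum pools
        match stack' with
        | [] => ([], result ++ [[i, w]], total + (i - j))
        | (p, l) :: rest => ((p, l ++ [[i, w]]) :: rest, result, total + (i - j))
    else (stack, result, total)

def area_cal_alt (input_fig : String) : List (List Int) × Int :=
  let s := (PySem.List.enumerate input_fig.toList 0).foldl areaAltStep ([], [], 0)
  -- `for _, pools in stack: result.extend(pools)` (bottom-to-top = reverse of top-first)
  (s.1.reverse.foldl (fun r e => r ++ e.2) s.2.1, s.2.2)

-- ===== PRECONDITION & SPEC =====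
def Spec_area_cal (input_fig : String) (out : List (List Int) × Int) : Prop := out = area_cal_alt input_fig
instance (input_fig : String) (out : List (List Int) × Int) : Decidable (Spec_area_cal input_fig out) := by unfold Spec_area_cal; infer_instance

-- ===== CLAIM (what is proved, stated in full; the proofs are below) =====
def Claim_equal_area_cal : Prop := ∀ (input_fig : String), Dom_area_cal input_fig → Spec_area_cal input_fig (area_cal input_fig)

-- ===== LEMMAS AND PROOFS =====

-- A's state reconstructed from B's state: stack positions, area list (most-recent-first:
-- top entry's pending pools reversed, then lower ones, then the finished result), total.
def pvRel (s : List (Int × List (List Int)) × List (List Int) × Int) :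
    List Int × List (List Int) × Int :=
  (s.1.map Prod.fst, s.1.flatMap (fun e => e.2.reverse) ++ s.2.1.reverse, s.2.2)

-- invariant: everything on B's stack/result lies strictly below the bound, pending pools
-- close strictly after the entry they sit on, and bounds decrease down the stack
def pvInv : Int → List (Int × List (List Int)) → List (List Int) → Prop
  | b, [], result => ∀ e ∈ result, e.headD 0 < b
  | b, (p, l) :: rest, result =>
      p < b ∧ (∀ e ∈ l, p < e.headD 0 ∧ e.headD 0 < b) ∧ pvInv p rest result

theorem pvInv_mono {b b' : Int} {st : List (Int × List (List Int))} {res : List (List Int)}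
    (h : pvInv b st res) (hb : b ≤ b') : pvInv b' st res := by
  cases st with
  | nil => exact fun e he => lt_of_lt_of_le (h e he) hb
  | cons hd tl =>
    obtain ⟨p, l⟩ := hd
    exact ⟨lt_of_lt_of_le h.1 hb, fun e he => ⟨(h.2.1 e he).1, lt_of_lt_of_le (h.2.1 e he).2 hb⟩, h.2.2⟩

theorem pvInv_below {b : Int} {st : List (Int × List (List Int))} {res : List (List Int)}
    (h : pvInv b st res) :
    ∀ e ∈ st.flatMap (fun e => e.2.reverse) ++ res.reverse, e.headD 0 < b := by
  induction st generalizing b with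
  | nil => intro e he; simp at he; exact h e he
  | cons hd tl ih =>
    obtain ⟨p, l⟩ := hd
    intro e he
    simp only [List.flatMap_cons, List.append_assoc, List.mem_append, List.mem_reverse] at he
    rcases he with he | he
    · exact (h.2.1 e he).2
    · have := ih h.2.2 e (by simpa [List.mem_append] using he)
      exact lt_trans this h.1

theorem areaCalMerge_spec (j w : Int) (l r : List (List Int))
    (hl : ∀ e ∈ l, j < e.headD 0) (hr : ∀ e ∈ r, e.headD 0 < j) :
    areaCalMerge j w (l ++ r) = (w + (l.map (fun e => e.getD 1 0)).sum, r) := by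
  induction l generalizing w with
  | nil =>
    cases r with
    | nil => simp [areaCalMerge]
    | cons e r' =>
      have hne : ¬ j < e.headD 0 := not_lt_of_gt (hr e (by simp))
      simp only [List.nil_append, areaCalMerge, if_neg hne]
      simp
  | cons e l' ih =>
    have hj : j < e.headD 0 := hl e (by simp)
    have := ih (w + e.getD 1 0) (fun x hx => hl x (by simp [hx]))
    simp only [List.cons_append, areaCalMerge, hj, if_pos, this, List.map_cons, List.sum_cons]
    ring_nf

-- one loop step: A's step on the related state equals B's step, related; invariant advances
theorem pvStep (i : Int) (c : Char) (stack : List (Int × List (List Int)))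
    (result : List (List Int)) (total : Int) (h : pvInv i stack result) :
    areaCalStep (pvRel (stack, result, total)) (i, c) = pvRel (areaAltStep (stack, result, total) (i, c))
    ∧ pvInv (i + 1) (areaAltStep (stack, result, total) (i, c)).1
        (areaAltStep (stack, result, total) (i, c)).2.1 := by
  by_cases hb : c = '\\'
  · subst hb
    refine ⟨by simp [areaCalStep, areaAltStep, pvRel], ?_⟩
    simp only [areaAltStep, reduceIte]
    exact ⟨by omega, by simp, pvInv_mono h le_rfl⟩
  · by_cases hs : c = '/'
    · subst hs
      cases stack with
      | nil =>
        refine ⟨?_, ?_⟩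
        · simp [areaCalStep, areaAltStep, pvRel, hb]
        · simp only [areaAltStep, if_neg hb, reduceIte]
          exact pvInv_mono h (by omega)
      | cons hd stack' =>
        obtain ⟨j, pools⟩ := hd
        have hjI : j < i := h.1
        have hpools : ∀ e ∈ pools.reverse, j < e.headD 0 := by
          intro e he; exact (h.2.1 e (by simpa using he)).1
        have hrest : ∀ e ∈ stack'.flatMap (fun e => e.2.reverse) ++ result.reverse, e.headD 0 < j :=
          pvInv_below h.2.2
        have hmerge := areaCalMerge_spec j (i - j) pools.reverse
            (stack'.flatMap (fun e => e.2.reverse) ++ result.reverse) hpools hrest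
        have hsum : (pools.reverse.map (fun e => e.getD 1 0)).sum = areaAltSum pools := by
          simp [areaAltSum, List.map_reverse]
        cases stack' with
        | nil =>
          refine ⟨?_, ?_⟩
          · have hm := hmerge
            simp only [List.flatMap_nil, List.nil_append] at hm
            simp only [areaCalStep, areaAltStep, pvRel, if_neg hb, reduceIte, List.map_cons,
              List.map_nil, List.flatMap_cons, List.flatMap_nil, List.append_nil, List.nil_append]
            rw [hm]
            simp [areaAltSum, List.getD_eq_getElem?_getD]
          · simp only [areaAltStep, if_neg hb, reduceIte]
            intro e he
            simp only [List.mem_append, List.mem_singleton] at he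
            rcases he with he | he
            · have : e.headD 0 < j := pvInv_below h.2.2 e (by simpa using (List.mem_reverse.mpr he))
              omega
            · subst he; simp only [List.headD_cons]; omega
        | cons hd' rest =>
          obtain ⟨p, l⟩ := hd'
          have hpj : p < j := h.2.2.1
          refine ⟨?_, ?_⟩
          · have hm := hmerge
            simp only [List.flatMap_cons, List.append_assoc] at hm
            simp only [areaCalStep, areaAltStep, pvRel, if_neg hb, reduceIte, List.map_cons,
              List.flatMap_cons, List.append_assoc]
            rw [hm]
            simp [areaAltSum, List.getD_eq_getElem?_getD]
          · simp only [areaAltStep, if_neg hb, reduceIte]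
            refine ⟨by omega, ?_, pvInv_mono h.2.2.2.2 le_rfl⟩
            intro e he
            simp only [List.mem_append, List.mem_singleton] at he
            rcases he with he | he
            · have := h.2.2.2.1 e he; omega
            · subst he; simp only [List.headD_cons]; omega
    · refine ⟨by simp [areaCalStep, areaAltStep, pvRel, hb, hs], ?_⟩
      simp only [areaAltStep, if_neg hb, if_neg hs]
      exact pvInv_mono h (by omega)

theorem pvFold (xs : List Char) : ∀ (s : Int) (stack : List (Int × List (List Int)))
    (result : List (List Int)) (total : Int), pvInv s stack result →
    (PySem.List.enumerate xs s).foldl areaCalStep (pvRel (stack, result, total)) =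
      pvRel ((PySem.List.enumerate xs s).foldl areaAltStep (stack, result, total)) := by
  induction xs with
  | nil => intro s stack result total _; simp [PySem.List.enumerate_nil]
  | cons c cs ih =>
    intro s stack result total h
    rw [PySem.List.enumerate_cons, List.foldl_cons, List.foldl_cons]
    obtain ⟨heq, hinv⟩ := pvStep s c stack result total h
    rw [heq]
    rcases hX : areaAltStep (stack, result, total) (s, c) with ⟨st', res', tot'⟩
    rw [hX] at hinv
    exact ih (s + 1) st' res' tot' hinv

-- result.extend over the remaining stack, bottom-to-top, as a flatten
theorem pvFlush (st : List (Int × List (List Int))) (res : List (List Int)) :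
    st.foldl (fun r e => r ++ e.2) res = res ++ st.flatMap (fun e => e.2) := by
  induction st generalizing res with
  | nil => simp
  | cons hd tl ih => simp [ih, List.append_assoc]

-- ===== VERDICT (by name: the statement is the Claim_ definition above) =====
theorem area_cal_spec : Claim_equal_area_cal := by
  intro input_fig _
  unfold Spec_area_cal area_cal area_cal_alt
  have h0 : pvInv 0 ([] : List (Int × List (List Int))) ([] : List (List Int)) := by
    intro e he; simp at he
  have := pvFold input_fig.toList 0 [] [] 0 h0
  have hrel : pvRel ([], [], 0) = (([] : List Int), ([] : List (List Int)), (0 : Int)) := by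
    simp [pvRel]
  rw [hrel] at this
  rw [this]
  obtain ⟨st, res, tot⟩ := (PySem.List.enumerate input_fig.toList 0).foldl areaAltStep ([], [], 0)
  simp only [pvRel, pvFlush]
  simp [List.reverse_append, Function.comp_def, List.flatMap_def,
    List.reverse_flatten, List.map_map]
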